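-- pv_equiv track=rewrite | github.com/bangtugu/Algorithm | BAEKJOON/2143_두_배열의_합.py | set_dic
-- ===== SOURCE A (Python) =====
-- def set_dic(Z, z_lst, z_line):
--     dic = {}
--     for i in range(1, Z+1):
--         for j in range(i, Z+1):
--             if i == j: z_lst[i][j] = z_line[i-1]
--             else:
--                 z_lst[i][j] = z_lst[i][j-1] + z_line[j-1]
--
--             if z_lst[i][j] not in dic: dic[z_lst[i][j]] = 0
--             dic[z_lst[i][j]] += 1
--
--     return dic
-- ===== SOURCE B (Python) =====
-- def set_dic(Z, z_lst, z_line):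
--     P = [0]
--     s = 0
--     for v in z_line[:Z]:
--         s += v
--         P.append(s)
--     dic = {}
--     for i in range(1, Z+1):
--         for j in range(i, Z+1):
--             t = P[j] - P[i-1]
--             dic[t] = dic.get(t, 0) + 1
--     return dic
-- ===== Notes on version B (the rewrite author's own statement) =====
-- stated objective: simpler
-- what changed: B replaces A's in-place 2-D accumulator table (and its i==j branch) with a separately built 1-D prefix-sum array, reading each subarray sum as P[j]-P[i-1]; B does not mutate z_lst (the equivalence is about the return value).
-- crash fix: When 0 < Z <= len(z_line) but z_lst is too short (or some row 1..Z has length <= Z), A raises IndexError while B, which never touches z_lst, returns the frequency dict of all subarray sums. — e.g. on set_dic(1, [], [5]): A raises IndexError, B returns [(5, 1)]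
import Mathlib
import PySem

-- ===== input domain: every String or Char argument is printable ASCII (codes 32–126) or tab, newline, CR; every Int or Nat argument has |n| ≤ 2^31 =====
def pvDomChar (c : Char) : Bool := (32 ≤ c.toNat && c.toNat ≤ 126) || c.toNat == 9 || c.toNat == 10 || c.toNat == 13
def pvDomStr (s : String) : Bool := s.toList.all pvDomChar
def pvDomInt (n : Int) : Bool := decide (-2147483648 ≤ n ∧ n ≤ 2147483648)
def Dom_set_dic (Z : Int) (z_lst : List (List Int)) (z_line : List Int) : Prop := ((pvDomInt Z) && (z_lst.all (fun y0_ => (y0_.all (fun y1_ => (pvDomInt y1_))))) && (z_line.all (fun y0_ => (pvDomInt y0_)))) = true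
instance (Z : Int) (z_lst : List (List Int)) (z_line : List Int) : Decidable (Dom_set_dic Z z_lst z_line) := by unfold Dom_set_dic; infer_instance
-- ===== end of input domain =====

-- B replaces A's in-place 2-D accumulator table (and its i==j branch) with a 1-D prefix-sum
-- array, reading each subarray sum as P[j]-P[i-1]; B does not mutate z_lst, so the equivalence
-- proved here is about the RETURN value only (A writes into z_lst, B leaves it untouched).

-- ===== PORT A =====
-- one inner-loop iteration of A (body of 'for j in range(i, Z+1)')
def stepA (z_line : List Int) (i : Int) (st : List (List Int) × PySem.Dict Int Int) (j : Int) :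
    List (List Int) × PySem.Dict Int Int :=
  let L := st.1
  let dic := st.2
  let v : Int :=
    if i == j then PySem.List.pyGetD z_line (i-1) 0
    else PySem.List.pyGetD (PySem.List.pyGetD L i []) (j-1) 0 + PySem.List.pyGetD z_line (j-1) 0
  let L' := PySem.List.pySetD L i (PySem.List.pySetD (PySem.List.pyGetD L i []) j v)
  let dic' := if dic.contains v then dic else dic.insert v 0
  (L', dic'.insert v (dic'.getD v 0 + 1))

def set_dic (Z : Int) (z_lst : List (List Int)) (z_line : List Int) : List (Int × Int) :=
  ((PySem.List.pyRange 1 (Z+1) 1).foldl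
    (fun st i => (PySem.List.pyRange i (Z+1) 1).foldl (stepA z_line i) st)
    (z_lst, PySem.Dict.empty)).2.items

-- ===== PORT B =====
-- P = [0]; s = 0; for v in z_line[:Z]: s += v; P.append(s)
def prefixList (Z : Int) (z_line : List Int) : List Int :=
  ((PySem.List.slice z_line none (some Z)).foldl
    (fun (ps : List Int × Int) v => (ps.1 ++ [ps.2 + v], ps.2 + v)) ([0], 0)).1

-- one inner-loop iteration of B
def stepB (P : List Int) (i : Int) (dic : PySem.Dict Int Int) (j : Int) : PySem.Dict Int Int :=
  let t := PySem.List.pyGetD P j 0 - PySem.List.pyGetD P (i-1) 0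
  dic.insert t (dic.getD t 0 + 1)

def set_dic_alt (Z : Int) (z_lst : List (List Int)) (z_line : List Int) : List (Int × Int) :=
  let P := prefixList Z z_line
  ((PySem.List.pyRange 1 (Z+1) 1).foldl
    (fun dic i => (PySem.List.pyRange i (Z+1) 1).foldl (stepB P i) dic)
    PySem.Dict.empty).items

-- ===== PRECONDITION & SPEC =====
-- Pre_ holds exactly where Python A returns: for positive Z it indexes z_lst[1..Z],
-- each such row at indices up to Z, and z_line at indices up to Z-1; anything shorter raises IndexError.
def Pre_set_dic (Z : Int) (z_lst : List (List Int)) (z_line : List Int) : Prop :=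
  0 < Z → (Z < (z_lst.length : Int) ∧ Z ≤ (z_line.length : Int) ∧
    ∀ i ∈ List.range' 1 Z.toNat, Z < ((z_lst.getD i []).length : Int))
instance (Z : Int) (z_lst : List (List Int)) (z_line : List Int) : Decidable (Pre_set_dic Z z_lst z_line) := by unfold Pre_set_dic; infer_instance
def pvWitness_set_dic : Int × List (List Int) × List Int := (1, [[0, 0], [0, 0]], [3])

-- Where 0 < Z ≤ len z_line but z_lst (rows 1..Z) is too short, A raises IndexError while B,
-- which never touches z_lst, returns the frequency dict of all subarray sums of z_line[:Z].
def Raises_set_dic (Z : Int) (z_lst : List (List Int)) (z_line : List Int) : Prop :=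
  0 < Z ∧ Z ≤ (z_line.length : Int) ∧
    ¬ (Z < (z_lst.length : Int) ∧ ∀ i ∈ List.range' 1 Z.toNat, Z < ((z_lst.getD i []).length : Int))
instance (Z : Int) (z_lst : List (List Int)) (z_line : List Int) : Decidable (Raises_set_dic Z z_lst z_line) := by unfold Raises_set_dic; infer_instance
def pvRaiseWitness_set_dic : Int × List (List Int) × List Int := (1, [], [5])
def pvRaiseWitnessOut_set_dic : List (Int × Int) := [(5, 1)]

def Spec_set_dic (Z : Int) (z_lst : List (List Int)) (z_line : List Int) (out : List (Int × Int)) : Prop := out = set_dic_alt Z z_lst z_line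
instance (Z : Int) (z_lst : List (List Int)) (z_line : List Int) (out : List (Int × Int)) : Decidable (Spec_set_dic Z z_lst z_line out) := by unfold Spec_set_dic; infer_instance

-- ===== CLAIM (what is proved, stated in full; the proofs are below) =====
def Claim_equal_set_dic : Prop := ∀ (Z : Int) (z_lst : List (List Int)) (z_line : List Int), Dom_set_dic Z z_lst z_line → Pre_set_dic Z z_lst z_line → Spec_set_dic Z z_lst z_line (set_dic Z z_lst z_line)
def Claim_raises_set_dic : Prop := (∀ (Z : Int) (z_lst : List (List Int)) (z_line : List Int), Dom_set_dic Z z_lst z_line → Raises_set_dic Z z_lst z_line → ¬ Pre_set_dic Z z_lst z_line) ∧ (Dom_set_dic (pvRaiseWitness_set_dic.1) (pvRaiseWitness_set_dic.2.1) (pvRaiseWitness_set_dic.2.2) ∧ Raises_set_dic (pvRaiseWitness_set_dic.1) (pvRaiseWitness_set_dic.2.1) (pvRaiseWitness_set_dic.2.2) ∧ set_dic_alt (pvRaiseWitness_set_dic.1) (pvRaiseWitness_set_dic.2.1) (pvRaiseWitness_set_dic.2.2) = pvRaiseWitnessOut_set_dic)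

-- ===== LEMMAS AND PROOFS =====

-- prefix sum of the first k entries of z_line
def pref (zl : List Int) (k : Int) : Int := (zl.take k.toNat).sum

theorem pref_succ (zl : List Int) (j : Int) (h1 : 1 ≤ j) (h2 : j ≤ (zl.length : Int)) :
    pref zl j = pref zl (j-1) + PySem.List.pyGetD zl (j-1) 0 := by
  have hlt : (j-1) < (zl.length : Int) := by omega
  rw [PySem.List.pyGetD_eq_getElem zl 0 (by omega) hlt]
  unfold pref
  rw [show j.toNat = (j-1).toNat + 1 from by omega,
    List.sum_take_succ _ _ (by omega)]

theorem prefixList_aux (t : List Int) : ∀ (acc : List Int) (s0 : Int),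
    t.foldl (fun (ps : List Int × Int) v => (ps.1 ++ [ps.2 + v], ps.2 + v)) (acc, s0)
      = (acc ++ (List.range t.length).map (fun k => s0 + (t.take (k+1)).sum), s0 + t.sum) := by
  induction t with
  | nil => intro acc s0; simp
  | cons v t ih =>
    intro acc s0
    simp only [List.foldl_cons, ih (acc ++ [s0 + v]) (s0 + v)]
    simp only [List.length_cons, List.range_succ_eq_map, List.map_cons, List.map_map]
    simp [List.sum_cons, Function.comp]
    exact ⟨fun a _ => by ring, by ring⟩

theorem prefixList_eq (Z : Int) (zl : List Int) (hz : 0 ≤ Z) :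
    prefixList Z zl
      = (List.range ((zl.take Z.toNat).length + 1)).map (fun k => ((zl.take Z.toNat).take k).sum) := by
  unfold prefixList
  rw [PySem.List.slice_to zl hz, prefixList_aux]
  simp [List.range_succ_eq_map, List.map_map, Function.comp]

theorem prefixList_getD (Z : Int) (zl : List Int) (hz : 0 ≤ Z) (h : Z ≤ (zl.length : Int))
    (k : Int) (h0 : 0 ≤ k) (hk : k ≤ Z) :
    PySem.List.pyGetD (prefixList Z zl) k 0 = pref zl k := by
  have hlen : (zl.take Z.toNat).length = Z.toNat := by
    rw [List.length_take]; omega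
  have hPlen : (prefixList Z zl).length = Z.toNat + 1 := by
    rw [prefixList_eq Z zl hz]; simp [hlen]
  rw [show k = ((k.toNat : Nat) : Int) from by omega, PySem.List.pyGetD_natCast]
  rw [prefixList_eq Z zl hz]
  rw [List.getD_eq_getElem?_getD, List.getElem?_map, List.getElem?_range (by simp [hlen]; omega)]
  simp only [Option.map_some, Option.getD_some, List.take_take]
  unfold pref
  congr 2
  omega

theorem dict_step (dic : PySem.Dict Int Int) (v : Int) :
    ((if dic.contains v then dic else dic.insert v 0).insert v
      ((if dic.contains v then dic else dic.insert v 0).getD v 0 + 1))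
      = dic.insert v (dic.getD v 0 + 1) := by
  by_cases h : dic.contains v = true
  · simp [h]
  · simp only [Bool.not_eq_true] at h
    simp only [h, Bool.false_eq_true, if_false, PySem.Dict.insert_insert_self,
      PySem.Dict.getD_insert_self, PySem.Dict.getD_of_not_contains dic 0 h]

theorem getD_set_self {α : Type} (L : List α) (n : Nat) (r : α) (d : α) (hn : n < L.length) :
    (L.set n r).getD n d = r := by
  rw [List.getD_eq_getElem?_getD, List.getElem?_set]
  simp [hn]

theorem getD_set_length (L : List (List Int)) (n : Nat) (r : List Int)
    (hr : r.length = (L.getD n []).length) (k : Nat) :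
    ((L.set n r).getD k []).length = (L.getD k []).length := by
  rw [List.getD_eq_getElem?_getD, List.getElem?_set]
  split_ifs with h1 h2
  · subst h1; simpa using hr
  · subst h1
    simp [List.getD_eq_getElem?_getD, List.getElem?_eq_none (by omega : L.length ≤ n)]
  · rw [List.getD_eq_getElem?_getD]

theorem inner (z_line P : List Int) (Z i : Int)
    (hP : ∀ k : Int, 0 ≤ k → k ≤ Z → PySem.List.pyGetD P k 0 = pref z_line k)
    (hzl : Z ≤ (z_line.length : Int)) (hi : 1 ≤ i) :
    ∀ (m : Nat) (j : Int) (L : List (List Int)) (dic : PySem.Dict Int Int),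
      j + m = Z + 1 → i ≤ j →
      i.toNat < L.length →
      Z < ((L.getD i.toNat []).length : Int) →
      (i < j → PySem.List.pyGetD (L.getD i.toNat []) (j-1) 0
          = pref z_line (j-1) - pref z_line (i-1)) →
      ((PySem.List.pyRange j (Z+1) 1).foldl (stepA z_line i) (L, dic)).2
          = (PySem.List.pyRange j (Z+1) 1).foldl (stepB P i) dic
      ∧ ((PySem.List.pyRange j (Z+1) 1).foldl (stepA z_line i) (L, dic)).1.length = L.length
      ∧ (∀ k : Nat, ((((PySem.List.pyRange j (Z+1) 1).foldl (stepA z_line i) (L, dic)).1.getD k []).length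
            = (L.getD k []).length)) := by
  intro m
  induction m with
  | zero =>
    intro j L dic hm hij hiL hrow hinv
    rw [PySem.List.pyRange_one_eq_nil (by omega)]
    exact ⟨rfl, rfl, fun k => rfl⟩
  | succ m ih =>
    intro j L dic hm hij hiL hrow hinv
    have hjZ : j ≤ Z := by omega
    have hiZ : i ≤ Z := by omega
    have hLi : PySem.List.pyGetD L i [] = L.getD i.toNat [] := by
      rw [PySem.List.pyGetD_eq_getElem L [] (by omega) (by omega),
        List.getD_eq_getElem?_getD, List.getElem?_eq_getElem hiL]
      rfl
    -- the value A stores (and B computes) at (i, j)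
    have hw : (if (i == j) then PySem.List.pyGetD z_line (i-1) 0
          else PySem.List.pyGetD (PySem.List.pyGetD L i []) (j-1) 0
            + PySem.List.pyGetD z_line (j-1) 0)
        = pref z_line j - pref z_line (i-1) := by
      by_cases h : i = j
      · subst h
        simp only [BEq.rfl, if_true]
        have := pref_succ z_line i hi (by omega)
        linarith
      · have hlt : i < j := by omega
        simp only [beq_iff_eq, h, if_false]
        rw [hLi, hinv hlt]
        have := pref_succ z_line j (by omega) (by omega)
        linarith
    have ht : PySem.List.pyGetD P j 0 - PySem.List.pyGetD P (i-1) 0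
        = pref z_line j - pref z_line (i-1) := by
      rw [hP j (by omega) (by omega), hP (i-1) (by omega) (by omega)]
    rw [PySem.List.pyRange_one_cons (by omega : j < Z+1)]
    simp only [List.foldl_cons, stepA, stepB]
    rw [hw, ht, dict_step]
    rw [PySem.List.pySetD_of_nonneg _ _ (by omega : (0:Int) ≤ i),
      PySem.List.pySetD_of_nonneg _ _ (by omega : (0:Int) ≤ j), hLi]
    have hrowlen : j.toNat < (L.getD i.toNat []).length := by omega
    set w := pref z_line j - pref z_line (i-1) with hwdef
    set L' := L.set i.toNat ((L.getD i.toNat []).set j.toNat w) with hL'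
    have hL'i : L'.getD i.toNat [] = (L.getD i.toNat []).set j.toNat w :=
      getD_set_self L i.toNat _ [] hiL
    have h1 := ih (j+1) L' (dic.insert w (dic.getD w 0 + 1)) (by omega) (by omega)
      (by rw [hL', List.length_set]; exact hiL)
      (by rw [hL'i, List.length_set]; exact hrow)
      (by intro _
          rw [hL'i, show j + 1 - 1 = j from by ring,
            PySem.List.pyGetD_eq_getElem _ 0 (by omega)
              (by rw [List.length_set]; omega)]
          rw [List.getElem_set_self (by rw [List.length_set]; exact hrowlen)])
    refine ⟨h1.1, ?_, ?_⟩
    · rw [h1.2.1, hL', List.length_set]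
    · intro k
      rw [h1.2.2 k, hL']
      exact getD_set_length L i.toNat _ (by simp [List.length_set]) k

theorem outer (z_line P : List Int) (Z : Int)
    (hP : ∀ k : Int, 0 ≤ k → k ≤ Z → PySem.List.pyGetD P k 0 = pref z_line k)
    (hzl : Z ≤ (z_line.length : Int)) :
    ∀ (m : Nat) (i : Int) (L : List (List Int)) (dic : PySem.Dict Int Int),
      i + m = Z + 1 → 1 ≤ i →
      Z < (L.length : Int) →
      (∀ k ∈ List.range' 1 Z.toNat, Z < ((L.getD k []).length : Int)) →
      ((PySem.List.pyRange i (Z+1) 1).foldl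
          (fun st i' => (PySem.List.pyRange i' (Z+1) 1).foldl (stepA z_line i') st) (L, dic)).2
        = (PySem.List.pyRange i (Z+1) 1).foldl
          (fun d i' => (PySem.List.pyRange i' (Z+1) 1).foldl (stepB P i') d) dic := by
  intro m
  induction m with
  | zero =>
    intro i L dic hm hi hL hrows
    rw [PySem.List.pyRange_one_eq_nil (by omega)]
    rfl
  | succ m ih =>
    intro i L dic hm hi hL hrows
    have hiZ : i ≤ Z := by omega
    have hiL : i.toNat < L.length := by omega
    have hrow : Z < ((L.getD i.toNat []).length : Int) := by
      refine hrows i.toNat ?_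
      rw [List.mem_range']
      exact ⟨i.toNat - 1, by omega, by omega⟩
    obtain ⟨h1, h2, h3⟩ := inner z_line P Z i hP hzl hi (m+1) i L dic (by omega) le_rfl
      hiL hrow (by omega)
    rw [PySem.List.pyRange_one_cons (by omega : i < Z+1)]
    simp only [List.foldl_cons]
    have hmain := ih (i+1)
      ((PySem.List.pyRange i (Z+1) 1).foldl (stepA z_line i) (L, dic)).1
      ((PySem.List.pyRange i (Z+1) 1).foldl (stepA z_line i) (L, dic)).2
      (by omega) (by omega) (by rw [h2]; exact hL)
      (by intro k hk; rw [h3 k]; exact hrows k hk)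
    simp only [Prod.mk.eta] at hmain
    rw [hmain, h1]

-- ===== VERDICT (by name: the statement is the Claim_ definition above) =====
theorem set_dic_spec : Claim_equal_set_dic := by
  intro Z z_lst z_line _ hpre
  unfold Spec_set_dic set_dic set_dic_alt
  by_cases hZ : 0 < Z
  · obtain ⟨h1, h2, h3⟩ := hpre hZ
    exact congrArg PySem.Dict.items
      (outer z_line (prefixList Z z_line) Z
        (fun k h0 hk => prefixList_getD Z z_line (le_of_lt hZ) h2 k h0 hk) h2
        Z.toNat 1 z_lst PySem.Dict.empty (by omega) le_rfl h1 h3)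
  · rw [PySem.List.pyRange_one_eq_nil (by omega)]
    rfl

@[simp]
theorem set_dic_raises : Claim_raises_set_dic := by
  unfold Claim_raises_set_dic
  refine ⟨?_, by decide⟩
  intro Z z_lst z_line _ hr hpre
  exact hr.2.2 ⟨(hpre hr.1).1, (hpre hr.1).2.2⟩
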